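/- GENERATED by mk_final_copies.py from the proof of the farm's unit `_sub_I_65535_1` (farm:_sub_I_65535_1.1: Proof.lean) as the
   re-elaboration sweep compiled it — do not edit. -/
import Asan.CheckWalk
import Vorbis.Spec.Units.sub_I_65535_1

open X86 X86.User Asan Vorbis

set_option maxRecDepth 4000
set_option maxHeartbeats 4000000

namespace Vorbis.Spec.sub_I_65535_1

/-- Two memories that agree on a window still agree on it after the SAME one-byte store to both (wherever the store goes). -/
theorem eqOn_write {lo hi : Nat} {m m' : Mem} (h : Mem.EqOn lo hi m m') (a : Word) (v : Byte) :
    Mem.EqOn lo hi (m.write a v) (m'.write a v) := by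
  intro x hx1 hx2
  by_cases e : a = x
  · subst e
    rw [Mem.read_write_same, Mem.read_write_same]
  · rw [Mem.read_write_other _ _ _ _ e, Mem.read_write_other _ _ _ _ e]
    exact h x hx1 hx2

/-- The same for the byte-fill loop of the runtime (`fillMem`: `k` one-byte stores). -/
theorem eqOn_fillMem {lo hi : Nat} {m m' : Mem} (h : Mem.EqOn lo hi m m') (g : Nat) (v : Byte) (k : Nat) :
    Mem.EqOn lo hi (fillMem m g v k) (fillMem m' g v k) := by
  induction k generalizing m m' g with
  | zero => exact h
  | succ k ih =>
    simp only [fillMem]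
    exact ih (eqOn_write h _ _) (g + 1)

/-- The same for the stores of one registration (`registerOne`: they do not depend on the memory's content). -/
theorem eqOn_registerOne {lo hi : Nat} {m m' : Mem} (h : Mem.EqOn lo hi m m') (d : GlobalDesc) :
    Mem.EqOn lo hi (registerOne m d) (registerOne m' d) := by
  unfold registerOne
  apply eqOn_fillMem
  by_cases e : (d.beg + d.size) % 8 = 0
  · rw [if_pos e, if_pos e]
    exact h
  · rw [if_neg e, if_neg e]
    exact eqOn_write h _ _

/-- **`registerMem` respects agreement on a window**: the store sequence of `__asan_register_globals` is the same whatever the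
memory holds, so two memories with the same shadow have the same shadow afterwards. This is what turns the callee's exact post
(`v.mem = registerMem s.mem descs`, `s` = the state after OUR push of the return address) into the constructor's post about `u.mem`. -/
theorem eqOn_registerMem {lo hi : Nat} {m m' : Mem} (h : Mem.EqOn lo hi m m') (ds : List GlobalDesc) :
    Mem.EqOn lo hi (registerMem m ds) (registerMem m' ds) := by
  induction ds generalizing m m' with
  | nil => exact h
  | cons d ds ih =>
    have e1 : registerMem m (d :: ds) = registerMem (registerOne m d) ds := rfl
    have e2 : registerMem m' (d :: ds) = registerMem (registerOne m' d) ds := rfl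
    rw [e1, e2]
    exact ih (eqOn_registerOne h d)

/-- **The descriptor table survives a store into the stack region**: the table of this image lies at `[1217C0H, 121940H)`, far
below the stack `[700000H, 800000H)`, so the `call`'s push of the return address does not change what the runtime reads. -/
theorem descsIn_push {m : Mem} (h : DescsIn m Vorbis.Spec.rt.table Vorbis.Spec.rt.descs) (a : Word) (v : Nat)
    (ha1 : 0x700000 ≤ a.toNat) (ha2 : a.toNat + 8 ≤ 0x800000) :
    DescsIn (m.writeLE a 8 v) Vorbis.Spec.rt.table Vorbis.Spec.rt.descs := by
  intro i hi
  have hi6 : i < 6 := hi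
  have htab : Vorbis.Spec.rt.table = 0x1217c0 := rfl
  obtain ⟨h1, h2, h3⟩ := h i hi
  have hw : Mem.NoWrap a 8 := by
    unfold Mem.NoWrap
    omega
  have key : ∀ off : Nat, off + 8 ≤ 64 →
      (m.writeLE a 8 v).readLE (UInt64.ofNat (Vorbis.Spec.rt.table + 64 * i + off)) 8 =
        m.readLE (UInt64.ofNat (Vorbis.Spec.rt.table + 64 * i + off)) 8 := by
    intro off hoff
    have e : (UInt64.ofNat (Vorbis.Spec.rt.table + 64 * i + off)).toNat = Vorbis.Spec.rt.table + 64 * i + off := by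
      rw [UInt64.toNat_ofNat', htab]
      omega
    apply Mem.readLE_writeLE_disjoint_noWrap _ _ _ _ _ _ hw
    · unfold Mem.NoWrap
      rw [e, htab]
      omega
    · left
      rw [e, htab]
      omega
  refine ⟨?_, ?_, ?_⟩
  · have := key 0 (by omega)
    rw [Nat.add_zero] at this
    rw [this]
    exact h1
  · rw [key 8 (by omega)]
    exact h2
  · rw [key 16 (by omega)]
    exact h3

/-- The shadow windows `__asan_register_globals` may write for the table of this image, as numbers: one per descriptor
(`shadowSpan beg (beg + sizeRz)`), so that `u_same` / `u_eqon` / `u_omega` can compare them with the stack. -/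
theorem registerWrites_rt :
    registerWrites Vorbis.Spec.rt.descs =
      [⟨12731072, 12731080⟩, ⟨12730560, 12730568⟩, ⟨12730568, 12730576⟩, ⟨12730576, 12730708⟩, ⟨12730712, 12730720⟩,
        ⟨12731264, 12731396⟩] := by
  rfl

/-- The windows of the callee's contract, as numbers. -/
theorem registerGlobalsSpec_writes (s : State) :
    (registerGlobalsSpec Vorbis.Spec.rt).writes s =
      [⟨12731072, 12731080⟩, ⟨12730560, 12730568⟩, ⟨12730568, 12730576⟩, ⟨12730576, 12730708⟩, ⟨12730712, 12730720⟩,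
        ⟨12731264, 12731396⟩] :=
  registerWrites_rt

/-- The windows of the constructor's own contract, as numbers (the same six). -/
theorem ctorSpec_writes (s : State) :
    (ctorSpec Vorbis.Spec.rt).writes s =
      [⟨12731072, 12731080⟩, ⟨12730560, 12730568⟩, ⟨12730568, 12730576⟩, ⟨12730576, 12730708⟩, ⟨12730712, 12730720⟩,
        ⟨12731264, 12731396⟩] :=
  registerWrites_rt

end Vorbis.Spec.sub_I_65535_1

/-- `_sub_I_65535_1` (the constructor gcc emitted, shim.c:97) satisfies `Asan.ctorSpec rt`: `sub rsp, 8`, the two constants,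
a CALL TO A FUNCTION WITH A CONTRACT (`__asan_register_globals`, whose pre is our pre moved across the push of the return
address), `add rsp, 8 ; ret`. The post (the shadow is that of `registerMem u.mem descs`) follows from the callee's exact post
by `eqOn_registerMem`. -/
theorem Vorbis.Spec.Worked.sub_I_65535_1_ok : Vorbis.Spec.sub_I_65535_1.Statement := by
  intro Lay hLay μ hμ u₀ hcode hreg u ret he hpre
  v_entry he
  obtain ⟨hdescs, hok⟩ := hpre
  -- 0x1038a0 … 0x1038ae: `sub rsp, 8 ; mov esi, 6 ; mov edi, 0x1217c0 ; call __asan_register_globals` (shim.c:97)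
  u_walk hcode [hμ.vendor] span [Vorbis.L.textLo, Vorbis.L.textHi] side (v_side)
  · -- call_inv: DF and the MXCSR masks at the callee's entry (`sub` wrote status flags only)
    show X86.User.abiInv _
    refine Vorbis.abiInv_of ?_ ?_
    · rw [w_flags]
      simp only [X86.User.df_setStatus]
      exact he_df
    · rw [w_mxcsr]
      exact he_mx
  · -- the callee's precondition
    refine ⟨?_, ?_, ?_, hok⟩
    · rw [w_rdi]
      rfl
    · rw [w_rsi]
      rfl
    · rw [w_mem]
      exact Vorbis.Spec.sub_I_65535_1.descsIn_push hdescs _ _ (by u_omega) (by u_omega)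
  -- after the return of `__asan_register_globals` (0x1038b3): what its contract says, restated for the returned state
  -- (`w_post` stays closed during the walk: its `s.mem = registerMem …` would be taken for a `w_mem`)
  have w_eq := Vorbis.conv_code_eqOn w_code
  have hdf : s_1038aer.flags .df = false := (show abiInv _ from w_inv).1
  have hmx : s_1038aer.mxcsr &&& 0x1F80 = 0x1F80 := (show abiInv _ from w_inv).2
  simp only [X86.User.Spec.footprint, vspec, w_rsp_1038ae,
    Vorbis.Spec.sub_I_65535_1.registerGlobalsSpec_writes] at w_same
  have hsame' : Mem.SameExcept
      [⟨(u.reg .rsp).toNat - 16, (u.reg .rsp).toNat⟩,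
        ⟨12731072, 12731080⟩, ⟨12730560, 12730568⟩, ⟨12730568, 12730576⟩, ⟨12730576, 12730708⟩, ⟨12730712, 12730720⟩,
        ⟨12731264, 12731396⟩] u.mem s_1038aer.mem := by
    u_same
  have hs0 : UInt64.ofNat (s_1038aer.mem.readLE (u.reg .rsp) 8) = ret := by
    u_frame he_retAddr
  u_walk hcode [hμ.vendor] span [Vorbis.L.textLo, Vorbis.L.textHi] side (v_side)
  -- 0x1038b7 `ret`: the contract's `Returned`
  refine ReachVia.done ?_
  refine X86.User.Returned.mk w_rip ?_ ?_ ?_ (Vorbis.conv_code_in w_eq) ?_ ?_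
  · -- rsp: the return address has been popped
    exact w_rsp
  · -- the callee-saved registers: never written
    u_saved
  · -- the footprint: our 16 bytes of stack and the callee's six shadow windows
    simp only [X86.User.Spec.footprint, vspec, Vorbis.Spec.sub_I_65535_1.ctorSpec_writes]
    rw [w_mem]
    exact hsame'
  · -- DF and the MXCSR masks: the callee's `Returned.inv`; `add` wrote status flags only
    show X86.User.abiInv _
    refine Vorbis.abiInv_of ?_ ?_
    · rw [w_flags]
      simp only [X86.User.df_setStatus]
      exact hdf
    · rw [w_mxcsr]
      exact hmx
  · -- the post: the SHADOW is that of `registerMem u.mem descs`. The callee's post is exact for the memory at ITS entry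
    -- (ours + the pushed return address, a stack store); the store sequence does not depend on the memory's content
    obtain ⟨hmem, _⟩ := w_post
    show Mem.EqOn 0xC00000 0xE00000 (registerMem u.mem Vorbis.Spec.rt.descs) s_1038b7.mem
    rw [w_mem, hmem]
    apply Vorbis.Spec.sub_I_65535_1.eqOn_registerMem
    rw [w_mem_1038ae]
    exact eqOn_shadow_writeLE _ _ _ _ (by u_omega) (by u_omega)
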